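-- pv_equiv track=rewrite | github.com/phoenixoOor/pxguard | pxguard/core/graph_engine.py | _pixel_to_braille
-- ===== SOURCE A (Python) =====
-- _BRAILLE_DOT_MAP = {(0, 0): 0, (0, 1): 3, (1, 0): 1, (1, 1): 4, (2, 0): 2, (2, 1): 5, (3, 0): 6, (3, 1): 7}
--
-- _BRAILLE_BASE = 0x2800
--
-- def _pixel_to_braille(pixels: list[list[bool]]) -> list[list[str]]:
--     """Convert 2D pixel grid (row-major, row 0 = top) to Braille characters. Each 4x2 block -> one char."""
--     if not pixels or not pixels[0]:
--         return []
--     h, w = len(pixels), len(pixels[0])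
--     br_h = (h + 3) // 4
--     br_w = (w + 1) // 2
--     out: list[list[str]] = [[chr(_BRAILLE_BASE) for _ in range(br_w)] for _ in range(br_h)]
--     for py in range(h):
--         for px in range(w):
--             if not pixels[py][px]:
--                 continue
--             br_y, br_x = py // 4, px // 2
--             if br_y >= br_h or br_x >= br_w:
--                 continue
--             local_y, local_x = py % 4, px % 2
--             bit_idx = _BRAILLE_DOT_MAP.get((local_y, local_x), 0)
--             code = ord(out[br_y][br_x]) - _BRAILLE_BASE
--             code |= 1 << bit_idx
--             out[br_y][br_x] = chr(_BRAILLE_BASE + code)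
--     return out
-- ===== SOURCE B (Python) =====
-- _BRAILLE_DOT_MAP = {(0, 0): 0, (0, 1): 3, (1, 0): 1, (1, 1): 4, (2, 0): 2, (2, 1): 5, (3, 0): 6, (3, 1): 7}
--
-- _BRAILLE_BASE = 0x2800
--
-- def _pixel_to_braille(pixels: list[list[bool]]) -> list[list[str]]:
--     """Gather per output cell: build each Braille char's code directly from its 4x2 block."""
--     if not pixels or not pixels[0]:
--         return []
--     h, w = len(pixels), len(pixels[0])
--     out: list[list[str]] = []
--     for br_y in range((h + 3) // 4):
--         row: list[str] = []
--         for br_x in range((w + 1) // 2):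
--             code = 0
--             for (ly, lx), bit in _BRAILLE_DOT_MAP.items():
--                 py, px = br_y * 4 + ly, br_x * 2 + lx
--                 if py < h and px < w and pixels[py][px]:
--                     code |= 1 << bit
--             row.append(chr(_BRAILLE_BASE + code))
--         out.append(row)
--     return out
-- ===== Notes on version B (the rewrite author's own statement) =====
-- stated objective: alternative
-- what changed: Replaces A's scatter (iterate every pixel, decode/re-encode the target cell's char to OR in one bit) with a gather: each output cell accumulates its code as a plain integer over the 8 dot positions of its 4x2 block and converts to a character exactly once.
import Mathlib
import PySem

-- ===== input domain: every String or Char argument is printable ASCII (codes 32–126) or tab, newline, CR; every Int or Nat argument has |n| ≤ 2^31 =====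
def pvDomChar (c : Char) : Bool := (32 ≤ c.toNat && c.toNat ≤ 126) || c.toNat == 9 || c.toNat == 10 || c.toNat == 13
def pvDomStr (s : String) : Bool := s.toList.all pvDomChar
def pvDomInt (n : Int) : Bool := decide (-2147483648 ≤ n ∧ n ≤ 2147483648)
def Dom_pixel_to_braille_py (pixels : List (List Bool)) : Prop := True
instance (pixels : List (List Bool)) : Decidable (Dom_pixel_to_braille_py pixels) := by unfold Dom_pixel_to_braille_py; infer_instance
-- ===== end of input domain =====

-- B is an alternative decomposition: A scatters every set pixel into a mutable char grid
-- (decoding and re-encoding the cell's character each time); B gathers each cell's code as a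
-- plain integer over the 8 dot positions of its 4x2 block and builds each character once.

-- ===== PORT A =====
-- chr(_BRAILLE_BASE + c) as a one-char string
def bChar (c : Nat) : String := String.ofList [Char.ofNat (0x2800 + c)]

-- _BRAILLE_DOT_MAP (dict; A reads it with .get(key, 0))
def brailleDotMap : PySem.Dict (Nat × Nat) Nat :=
  PySem.Dict.ofList [((0,0),0),((0,1),3),((1,0),1),((1,1),4),((2,0),2),((2,1),5),((3,0),6),((3,1),7)]

def pixel_to_braille_py (pixels : List (List Bool)) : List (List String) :=
  if pixels = [] ∨ pixels.headD [] = [] then [] else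
  let h := pixels.length
  let w := (pixels.headD []).length
  let brh := (h+3)/4
  let brw := (w+1)/2
  let out0 := List.replicate brh (List.replicate brw (bChar 0))
  (List.range h).foldl (fun out py =>
    (List.range w).foldl (fun out px =>
      if (pixels.getD py []).getD px false = false then out
      else if brh ≤ py/4 ∨ brw ≤ px/2 then out
      else
        let bit := brailleDotMap.getD (py % 4, px % 2) 0
        let code := ((((out.getD (py/4) []).getD (px/2) "").toList.headD ' ').toNat - 0x2800) ||| (1 <<< bit)
        out.set (py/4) ((out.getD (py/4) []).set (px/2) (bChar code))
      ) out) out0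

-- ===== PORT B =====
-- _BRAILLE_DOT_MAP.items() for B's per-cell gather
def brailleDotList : List ((Nat × Nat) × Nat) :=
  [((0,0),0),((0,1),3),((1,0),1),((1,1),4),((2,0),2),((2,1),5),((3,0),6),((3,1),7)]

def pixel_to_braille_py_alt (pixels : List (List Bool)) : List (List String) :=
  if pixels = [] ∨ pixels.headD [] = [] then [] else
  let h := pixels.length
  let w := (pixels.headD []).length
  (List.range ((h+3)/4)).map fun bry =>
    (List.range ((w+1)/2)).map fun brx =>
      bChar (brailleDotList.foldl (fun code d =>
        if bry*4 + d.1.1 < h ∧ brx*2 + d.1.2 < w ∧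
            (pixels.getD (bry*4 + d.1.1) []).getD (brx*2 + d.1.2) false = true
        then code ||| (1 <<< d.2) else code) 0)

-- ===== PRECONDITION & SPEC =====
-- Pre_ excludes ragged grids with a row shorter than row 0, on which A raises IndexError.
def Pre_pixel_to_braille_py (pixels : List (List Bool)) : Prop :=
  ∀ row ∈ pixels, (pixels.headD []).length ≤ row.length
instance (pixels : List (List Bool)) : Decidable (Pre_pixel_to_braille_py pixels) := by
  unfold Pre_pixel_to_braille_py; infer_instance
def pvWitness_pixel_to_braille_py : List (List Bool) := [[true, false], [false, true]]

def Spec_pixel_to_braille_py (pixels : List (List Bool)) (out : List (List String)) : Prop := out = pixel_to_braille_py_alt pixels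
instance (pixels : List (List Bool)) (out : List (List String)) : Decidable (Spec_pixel_to_braille_py pixels out) := by unfold Spec_pixel_to_braille_py; infer_instance

-- ===== CLAIM (what is proved, stated in full; the proofs are below) =====
def Claim_equal_pixel_to_braille_py : Prop := ∀ (pixels : List (List Bool)), Dom_pixel_to_braille_py pixels → Pre_pixel_to_braille_py pixels → Spec_pixel_to_braille_py pixels (pixel_to_braille_py pixels)

-- ===== LEMMAS AND PROOFS =====

-- the pixel read both ports perform
def pix (pixels : List (List Bool)) (py px : Nat) : Bool := (pixels.getD py []).getD px false

-- a grid of Braille chars given by a code function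
def bGrid (brh brw : Nat) (c : Nat → Nat → Nat) : List (List String) :=
  (List.range brh).map fun i => (List.range brw).map fun j => bChar (c i j)

-- A's per-cell contribution of one pixel (py, px) to cell (i, j)
def astep (pixels : List (List Bool)) (i j : Nat) (c : Nat) (p : Nat × Nat) : Nat :=
  if pix pixels p.1 p.2 = true ∧ p.1/4 = i ∧ p.2/2 = j
  then c ||| (1 <<< brailleDotMap.getD (p.1 % 4, p.2 % 2) 0) else c

lemma bGrid_congr {brh brw : Nat} {c c' : Nat → Nat → Nat}
    (h : ∀ i < brh, ∀ j < brw, c i j = c' i j) : bGrid brh brw c = bGrid brh brw c' := by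
  unfold bGrid
  refine List.map_congr_left ?_
  intro i hi
  refine List.map_congr_left ?_
  intro j hj
  rw [h i (List.mem_range.mp hi) j (List.mem_range.mp hj)]

lemma set_map_range {α : Type} (n i : Nat) (f : Nat → α) (a : α) :
    ((List.range n).map f).set i a = (List.range n).map (fun k => if k = i then a else f k) := by
  apply List.ext_getElem (by simp)
  intro k h1 h2
  simp only [List.getElem_set, List.getElem_map, List.getElem_range]
  by_cases h : i = k
  · subst h; simp
  · rw [if_neg h, if_neg (fun hk => h hk.symm)]

lemma decode_bChar (c : Nat) (hc : c < 256) :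
    (((bChar c).toList.headD ' ').toNat - 0x2800) = c := by
  have hv : (0x2800 + c).isValidChar := Or.inl (by omega)
  rw [bChar, String.toList_ofList]
  simp only [List.headD_cons]
  have : (Char.ofNat (0x2800 + c)).toNat = 0x2800 + c := by rw [Char.ofNat, dif_pos hv]; rfl
  omega

lemma astep_lt (pixels : List (List Bool)) (i j c : Nat) (p : Nat × Nat) (hc : c < 256) :
    astep pixels i j c p < 256 := by
  unfold astep
  split
  · have h4 : p.1 % 4 = 0 ∨ p.1 % 4 = 1 ∨ p.1 % 4 = 2 ∨ p.1 % 4 = 3 := by omega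
    have h2 : p.2 % 2 = 0 ∨ p.2 % 2 = 1 := by omega
    have hb : brailleDotMap.getD (p.1 % 4, p.2 % 2) 0 < 8 := by
      rcases h4 with h|h|h|h <;> rcases h2 with h'|h' <;> rw [h, h'] <;> decide
    have : (1 <<< brailleDotMap.getD (p.1 % 4, p.2 % 2) 0) < 256 := by
      rw [Nat.one_shiftLeft]
      calc 2 ^ brailleDotMap.getD (p.1 % 4, p.2 % 2) 0 ≤ 2 ^ 7 := Nat.pow_le_pow_right (by omega) (by omega)
        _ < 256 := by omega
    exact Nat.or_lt_two_pow (n := 8) hc this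
  · exact hc

-- the grid invariant: A's scatter fold over a list of in-bounds pixel coordinates
-- equals the bGrid of the per-cell folds
lemma grid_fold (pixels : List (List Bool)) (h w : Nat)
    (L : List (Nat × Nat)) (hL : ∀ p ∈ L, p.1 < h ∧ p.2 < w)
    (c : Nat → Nat → Nat) (hc : ∀ i j, c i j < 256) :
    L.foldl (fun out p =>
      if pix pixels p.1 p.2 = false then out
      else if (h+3)/4 ≤ p.1/4 ∨ (w+1)/2 ≤ p.2/2 then out
      else
        let bit := brailleDotMap.getD (p.1 % 4, p.2 % 2) 0
        let code := ((((out.getD (p.1/4) []).getD (p.2/2) "").toList.headD ' ').toNat - 0x2800) ||| (1 <<< bit)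
        out.set (p.1/4) ((out.getD (p.1/4) []).set (p.2/2) (bChar code)))
      (bGrid ((h+3)/4) ((w+1)/2) c)
    = bGrid ((h+3)/4) ((w+1)/2) (fun i j => L.foldl (astep pixels i j) (c i j)) := by
  induction L generalizing c with
  | nil => simp
  | cons p L ih =>
    obtain ⟨hp1, hp2⟩ := hL p (by simp)
    have hL' : ∀ q ∈ L, q.1 < h ∧ q.2 < w := fun q hq => hL q (by simp [hq])
    have hbry : p.1/4 < (h+3)/4 := by omega
    have hbrx : p.2/2 < (w+1)/2 := by omega
    have hc' : ∀ i j, astep pixels i j (c i j) p < 256 :=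
      fun i j => astep_lt pixels i j (c i j) p (hc i j)
    simp only [List.foldl_cons]
    by_cases hpix : pix pixels p.1 p.2 = false
    · rw [if_pos hpix, ih hL' c hc]
      apply bGrid_congr
      intro i _ j _
      congr 1
      simp [astep, hpix]
    · have hpixT : pix pixels p.1 p.2 = true := by
        revert hpix; cases pix pixels p.1 p.2 <;> simp
      rw [if_neg hpix, if_neg (by omega)]
      have hread : ((bGrid ((h+3)/4) ((w+1)/2) c).getD (p.1/4) []).getD (p.2/2) ""
          = bChar (c (p.1/4) (p.2/2)) := by
        unfold bGrid
        rw [PySem.List.getD_map_range _ _ _ _ hbry, PySem.List.getD_map_range _ _ _ _ hbrx]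
      have hset : (bGrid ((h+3)/4) ((w+1)/2) c).set (p.1/4)
            (((bGrid ((h+3)/4) ((w+1)/2) c).getD (p.1/4) []).set (p.2/2)
              (bChar ((c (p.1/4) (p.2/2)) ||| (1 <<< brailleDotMap.getD (p.1 % 4, p.2 % 2) 0))))
          = bGrid ((h+3)/4) ((w+1)/2) (fun i j => astep pixels i j (c i j) p) := by
        unfold bGrid
        rw [PySem.List.getD_map_range _ _ _ _ hbry]
        rw [set_map_range]
        apply List.map_congr_left
        intro i _
        by_cases h1 : i = p.1/4
        · subst h1
          rw [if_pos rfl, set_map_range]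
          apply List.map_congr_left
          intro j _
          by_cases h2 : j = p.2/2
          · subst h2
            simp [astep, hpixT]
          · rw [if_neg h2]
            simp only [astep]
            rw [if_neg (by tauto)]
        · rw [if_neg h1]
          apply List.map_congr_left
          intro j _
          simp only [astep]
          rw [if_neg (by tauto)]
      simp only [hread, decode_bChar _ (hc _ _), hset]
      rw [ih hL' _ hc']

-- row-major nested loops over range h × range w = one fold over the flattened coordinate list
lemma foldl_pairs {α : Type} (g : α → Nat × Nat → α) (hn wn : Nat) (init : α) :
    ((List.range hn).flatMap (fun py => (List.range wn).map (Prod.mk py))).foldl g init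
    = (List.range hn).foldl (fun s py => (List.range wn).foldl (fun s px => g s (py, px)) s) init := by
  induction hn with
  | zero => simp
  | succ n ih =>
    rw [List.range_succ, List.flatMap_append, List.foldl_append, List.foldl_append, ih]
    simp [List.foldl_map]

-- a bit of the result of an OR-accumulating fold
lemma testBit_foldl_or {α : Type} (P : α → Prop) [DecidablePred P] (f : α → Nat)
    (l : List α) (init b : Nat) :
    (l.foldl (fun c x => if P x then c ||| f x else c) init).testBit b
    = (init.testBit b || l.any (fun x => decide (P x) && (f x).testBit b)) := by
  induction l generalizing init with
  | nil => simp
  | cons x l ih =>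
    simp only [List.foldl_cons, List.any_cons]
    by_cases h : P x
    · rw [if_pos h, ih, Nat.testBit_or]
      simp [h, Bool.or_assoc]
    · rw [if_neg h, ih]
      simp [h]

-- per cell: A's scatter contributions over the whole coordinate list = B's gather over the 8 dots
lemma cell_eq (pixels : List (List Bool)) (h w i j : Nat) :
    ((List.range h).flatMap (fun py => (List.range w).map (Prod.mk py))).foldl
      (astep pixels i j) 0
    = brailleDotList.foldl (fun code d =>
        if i*4 + d.1.1 < h ∧ j*2 + d.1.2 < w ∧ pix pixels (i*4 + d.1.1) (j*2 + d.1.2) = true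
        then code ||| (1 <<< d.2) else code) 0 := by
  apply Nat.eq_of_testBit_eq
  intro b
  have ha : (astep pixels i j) = fun c (p : Nat × Nat) =>
      if pix pixels p.1 p.2 = true ∧ p.1/4 = i ∧ p.2/2 = j
      then c ||| ((fun p : Nat × Nat => 1 <<< brailleDotMap.getD (p.1 % 4, p.2 % 2) 0) p) else c := rfl
  rw [ha,
    testBit_foldl_or (fun p : Nat × Nat => pix pixels p.1 p.2 = true ∧ p.1/4 = i ∧ p.2/2 = j)
      (fun p : Nat × Nat => 1 <<< brailleDotMap.getD (p.1 % 4, p.2 % 2) 0),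
    testBit_foldl_or (fun d : (Nat × Nat) × Nat =>
        i*4 + d.1.1 < h ∧ j*2 + d.1.2 < w ∧ pix pixels (i*4 + d.1.1) (j*2 + d.1.2) = true)
      (fun d : (Nat × Nat) × Nat => 1 <<< d.2)]
  simp only [Nat.zero_testBit, Bool.false_or]
  rw [Bool.eq_iff_iff]
  simp only [List.any_eq_true, List.mem_flatMap, List.mem_map, List.mem_range,
    Bool.and_eq_true, decide_eq_true_eq]
  constructor
  · rintro ⟨p, ⟨py, hpy, px, hpx, rfl⟩, ⟨hpix, hdi, hdj⟩, hbit⟩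
    simp only at hpix hdi hdj hbit
    have hy : py % 4 = 0 ∨ py % 4 = 1 ∨ py % 4 = 2 ∨ py % 4 = 3 := by omega
    have hx : px % 2 = 0 ∨ px % 2 = 1 := by omega
    have hpyeq : i*4 + py % 4 = py := by omega
    have hpxeq : j*2 + px % 2 = px := by omega
    have hmem : ((py % 4, px % 2), brailleDotMap.getD (py % 4, px % 2) 0) ∈ brailleDotList := by
      rcases hy with hy|hy|hy|hy <;> rcases hx with hx|hx <;> rw [hy, hx] <;> decide
    refine ⟨((py % 4, px % 2), brailleDotMap.getD (py % 4, px % 2) 0), hmem, ⟨?_, ?_, ?_⟩, ?_⟩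
    · simpa [hpyeq] using hpy
    · simpa [hpxeq] using hpx
    · simpa [hpyeq, hpxeq] using hpix
    · simpa using hbit
  · rintro ⟨d, hd, ⟨h1, h2, h3⟩, hbit⟩
    have hfacts : d.1.1 < 4 ∧ d.1.2 < 2 ∧ brailleDotMap.getD (d.1.1, d.1.2) 0 = d.2 := by
      simp only [brailleDotList, List.mem_cons, List.not_mem_nil, or_false] at hd
      rcases hd with rfl|rfl|rfl|rfl|rfl|rfl|rfl|rfl <;> decide
    obtain ⟨hl4, hl2, hmap⟩ := hfacts
    have e1 : (i*4 + d.1.1) % 4 = d.1.1 := by omega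
    have e2 : (j*2 + d.1.2) % 2 = d.1.2 := by omega
    refine ⟨(i*4 + d.1.1, j*2 + d.1.2), ⟨i*4 + d.1.1, h1, j*2 + d.1.2, h2, rfl⟩,
      ⟨h3, by omega, by omega⟩, ?_⟩
    simpa [e1, e2, hmap] using hbit

-- ===== VERDICT (by name: the statement is the Claim_ definition above) =====
theorem pixel_to_braille_py_spec : Claim_equal_pixel_to_braille_py := by
  intro pixels _ _
  unfold Spec_pixel_to_braille_py pixel_to_braille_py pixel_to_braille_py_alt
  by_cases hguard : pixels = [] ∨ pixels.headD [] = []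
  · rw [if_pos hguard, if_pos hguard]
  · rw [if_neg hguard, if_neg hguard]
    show (List.range pixels.length).foldl (fun out py =>
        (List.range (pixels.headD []).length).foldl (fun out px =>
          if (pixels.getD py []).getD px false = false then out
          else if (pixels.length+3)/4 ≤ py/4 ∨ ((pixels.headD []).length+1)/2 ≤ px/2 then out
          else
            let bit := brailleDotMap.getD (py % 4, px % 2) 0
            let code := ((((out.getD (py/4) []).getD (px/2) "").toList.headD ' ').toNat - 0x2800) ||| (1 <<< bit)
            out.set (py/4) ((out.getD (py/4) []).set (px/2) (bChar code))) out)
        (List.replicate ((pixels.length+3)/4) (List.replicate (((pixels.headD []).length+1)/2) (bChar 0)))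
      = (List.range ((pixels.length+3)/4)).map (fun bry =>
          (List.range (((pixels.headD []).length+1)/2)).map (fun brx =>
            bChar (brailleDotList.foldl (fun code d =>
              if bry*4 + d.1.1 < pixels.length ∧ brx*2 + d.1.2 < (pixels.headD []).length ∧
                  (pixels.getD (bry*4 + d.1.1) []).getD (brx*2 + d.1.2) false = true
              then code ||| (1 <<< d.2) else code) 0)))
    set h := pixels.length with hh
    set w := (pixels.headD []).length with hw
    have hrep : List.replicate ((h+3)/4) (List.replicate ((w+1)/2) (bChar 0))
        = bGrid ((h+3)/4) ((w+1)/2) (fun _ _ => 0) := by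
      simp [bGrid, List.map_const']
    have hL : ∀ p ∈ (List.range h).flatMap (fun py => (List.range w).map (Prod.mk py)),
        p.1 < h ∧ p.2 < w := by
      intro p hp
      simp only [List.mem_flatMap, List.mem_map, List.mem_range] at hp
      obtain ⟨py, hpy, px, hpx, rfl⟩ := hp
      exact ⟨hpy, hpx⟩
    rw [hrep]
    exact (foldl_pairs (fun out (p : Nat × Nat) =>
        if pix pixels p.1 p.2 = false then out
        else if (h+3)/4 ≤ p.1/4 ∨ (w+1)/2 ≤ p.2/2 then out
        else
          let bit := brailleDotMap.getD (p.1 % 4, p.2 % 2) 0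
          let code := ((((out.getD (p.1/4) []).getD (p.2/2) "").toList.headD ' ').toNat - 0x2800) ||| (1 <<< bit)
          out.set (p.1/4) ((out.getD (p.1/4) []).set (p.2/2) (bChar code))) h w
        (bGrid ((h+3)/4) ((w+1)/2) (fun _ _ => 0))).symm.trans
      ((grid_fold pixels h w _ hL (fun _ _ => 0) (fun i j => by show (0:Nat) < 256; omega)).trans
        (bGrid_congr (fun i _ j _ => cell_eq pixels h w i j)))
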